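-- pv_equiv track=rewrite | github.com/v2rg/platiru-telegram-bot | search_bs4.py | __duplicates_search
-- ===== SOURCE A (Python) =====
-- def __duplicates_search(sorted_results):  # ищем повторы
--     results = []
--
--     for i in range(len(sorted_results)):
--         for j in range(i + 1, len(sorted_results)):
--             if sorted_results[i][1] == sorted_results[j][1]:
--                 results.append((sorted_results[i][0] + '_' + sorted_results[j][0], sorted_results[i][1]))
--
--     if results:
--         return results
--     else:
--         return sorted_results
-- ===== SOURCE B (Python) =====
-- def __duplicates_search(sorted_results):
--     # One backward pass with a dict: value -> first-fields of elements seen so far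
--     # (i.e. elements after the current position, in original order).
--     later = {}
--     chunks = []
--     for name, value in reversed(sorted_results):
--         group = later.get(value, [])
--         if group:
--             chunks.append([(name + '_' + other, value) for other in group])
--         later[value] = [name] + group
--     results = [pair for chunk in reversed(chunks) for pair in chunk]
--     return results if results else sorted_results
-- ===== Notes on version B (the rewrite author's own statement) =====
-- stated objective: alternative
-- what changed: Replaced the all-pairs double index loop by a single backward pass that maintains a dict from second field to the first fields seen after the current position, emitting each element's pairs directly from its group.
import Mathlib
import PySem

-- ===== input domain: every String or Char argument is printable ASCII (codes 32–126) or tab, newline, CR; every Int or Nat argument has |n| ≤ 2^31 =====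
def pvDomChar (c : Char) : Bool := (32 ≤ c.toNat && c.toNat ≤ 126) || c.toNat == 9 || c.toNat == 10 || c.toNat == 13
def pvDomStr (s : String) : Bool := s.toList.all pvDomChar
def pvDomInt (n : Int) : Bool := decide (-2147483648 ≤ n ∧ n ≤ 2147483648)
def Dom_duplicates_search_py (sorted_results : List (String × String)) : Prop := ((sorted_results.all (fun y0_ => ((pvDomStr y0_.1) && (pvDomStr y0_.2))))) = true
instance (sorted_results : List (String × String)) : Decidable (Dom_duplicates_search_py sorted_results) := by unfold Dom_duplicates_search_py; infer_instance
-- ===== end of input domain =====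

-- B replaces A's all-pairs double index loop by one backward pass with a dict from the
-- second field to the first fields of the elements already seen (alternative algorithm).

-- ===== PORT A =====
-- literal port of the nested index loops; indices are always in range, so pyGetD's default is never used
def duplicates_search_py (sorted_results : List (String × String)) : List (String × String) :=
  let n : Int := PySem.List.len sorted_results
  let results : List (String × String) :=
    (PySem.List.pyRange 0 n 1).foldl (fun results i =>
      let xi := PySem.List.pyGetD sorted_results i ("", "")
      (PySem.List.pyRange (i + 1) n 1).foldl (fun results j =>
        if xi.2 == (PySem.List.pyGetD sorted_results j ("", "")).2 then
          results ++ [(xi.1 ++ "_" ++ (PySem.List.pyGetD sorted_results j ("", "")).1, xi.2)]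
        else results) results) []
  if results ≠ [] then results else sorted_results

-- ===== PORT B =====
-- loop body of Source B: state = (chunks, later-dict); group = later.get(value, [])
def pvStepB (st : List (List (String × String)) × PySem.Dict String (List String))
    (x : String × String) :
    List (List (String × String)) × PySem.Dict String (List String) :=
  let group := st.2.getD x.2 []
  let chunks := if group ≠ [] then
      st.1 ++ [group.map (fun other => (x.1 ++ "_" ++ other, x.2))]
    else st.1
  (chunks, st.2.insert x.2 (x.1 :: group))

-- one pass over reversed(sorted_results), then flatten the reversed chunks
def duplicates_search_py_alt (sorted_results : List (String × String)) : List (String × String) :=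
  let st := sorted_results.reverse.foldl pvStepB ([], PySem.Dict.empty)
  let results := st.1.reverse.flatten
  if results ≠ [] then results else sorted_results

-- ===== PRECONDITION & SPEC =====
def Spec_duplicates_search_py (sorted_results : List (String × String)) (out : List (String × String)) : Prop := out = duplicates_search_py_alt sorted_results
instance (sorted_results : List (String × String)) (out : List (String × String)) : Decidable (Spec_duplicates_search_py sorted_results out) := by unfold Spec_duplicates_search_py; infer_instance

-- ===== CLAIM (what is proved, stated in full; the proofs are below) =====
def Claim_equal_duplicates_search_py : Prop := ∀ (sorted_results : List (String × String)), Dom_duplicates_search_py sorted_results → Spec_duplicates_search_py sorted_results (duplicates_search_py sorted_results)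

-- ===== LEMMAS AND PROOFS =====

-- the common characterisation: for each element, its pairs with the later equal-valued elements
def pvSpecDup : List (String × String) → List (String × String)
  | [] => []
  | x :: rest =>
      (rest.filter (fun y => y.2 == x.2)).map (fun y => (x.1 ++ "_" ++ y.1, x.2)) ++ pvSpecDup rest

-- B's dict maps each value to the first fields of the matching elements, in order
theorem pvB_dict (xs : List (String × String)) (v : String) :
    (xs.reverse.foldl pvStepB ([], PySem.Dict.empty)).2.getD v []
      = (xs.filter (fun y => y.2 == v)).map Prod.fst := by
  induction xs with
  | nil => simp [PySem.Dict.getD_empty]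
  | cons x xs ih =>
    rw [List.reverse_cons, List.foldl_append, List.foldl_cons, List.foldl_nil, List.filter_cons]
    show ((xs.reverse.foldl pvStepB ([], PySem.Dict.empty)).2.insert x.2
        (x.1 :: (xs.reverse.foldl pvStepB ([], PySem.Dict.empty)).2.getD x.2 [])).getD v [] = _
    rw [PySem.Dict.getD_insert]
    by_cases hv : v = x.2
    · subst hv
      rw [if_pos rfl, ih]
      have hb : (x.2 == x.2) = true := by simp
      rw [hb]
      simp
    · rw [if_neg hv]
      have hb : (x.2 == v) = false := by simp; exact fun h => hv h.symm
      rw [hb, ih]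
      simp

-- B's chunks, reversed and flattened, are pvSpecDup
theorem pvB_chunks (xs : List (String × String)) :
    (xs.reverse.foldl pvStepB ([], PySem.Dict.empty)).1.reverse.flatten = pvSpecDup xs := by
  induction xs with
  | nil => simp [pvSpecDup]
  | cons x xs ih =>
    rw [List.reverse_cons, List.foldl_append, List.foldl_cons, List.foldl_nil]
    show (if (xs.reverse.foldl pvStepB ([], PySem.Dict.empty)).2.getD x.2 [] ≠ [] then
        (xs.reverse.foldl pvStepB ([], PySem.Dict.empty)).1 ++
          [((xs.reverse.foldl pvStepB ([], PySem.Dict.empty)).2.getD x.2 []).map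
            (fun other => (x.1 ++ "_" ++ other, x.2))]
      else (xs.reverse.foldl pvStepB ([], PySem.Dict.empty)).1).reverse.flatten = _
    rw [pvB_dict xs x.2]
    by_cases hg : (xs.filter (fun y => y.2 == x.2)).map Prod.fst = []
    · have hf : xs.filter (fun y => y.2 == x.2) = [] := by simpa using hg
      rw [if_neg (by simp [hg])]
      rw [ih]
      simp [pvSpecDup, hf]
    · rw [if_pos hg]
      rw [List.reverse_append, List.map_map]
      simp only [List.reverse_cons, List.reverse_nil, List.nil_append, List.flatten_cons,
        List.flatten_append]
      rw [ih]
      simp only [pvSpecDup, List.flatten_nil, List.append_nil]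
      rfl

-- A's inner loop over j in range(i+1, n) appends x's pairs with the equal-valued suffix elements
theorem pvA_inner (xs : List (String × String)) (x : String × String) (i : Nat)
    (acc : List (String × String)) :
    (PySem.List.pyRange ((i : Int) + 1) (PySem.List.len xs) 1).foldl (fun results j =>
        if x.2 == (PySem.List.pyGetD xs j ("", "")).2 then
          results ++ [(x.1 ++ "_" ++ (PySem.List.pyGetD xs j ("", "")).1, x.2)]
        else results) acc
      = acc ++ ((xs.drop (i + 1)).filter (fun y => y.2 == x.2)).map
          (fun y => (x.1 ++ "_" ++ y.1, x.2)) := by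
  have h0 : (0 : Int) ≤ (i : Int) + 1 := by omega
  rw [PySem.List.foldl_pyRange_pyGetD (xs := xs) (d := ("", ""))
      (f := fun results y =>
        if x.2 == y.2 then results ++ [(x.1 ++ "_" ++ y.1, x.2)] else results)
      (init := acc) h0]
  have ht : ((i : Int) + 1).toNat = i + 1 := by omega
  rw [ht]
  have hfil : List.filter (fun y : String × String => y.2 == x.2) (xs.drop (i + 1))
      = List.filter (fun y : String × String => x.2 == y.2) (xs.drop (i + 1)) :=
    List.filter_congr (fun y _ => by simp [eq_comm])
  rw [hfil]
  exact PySem.List.foldl_append_if _ _ _ _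

-- A's outer loop from index a accumulates exactly pvSpecDup of the suffix
theorem pvA_outer (xs : List (String × String)) (a : Nat) (acc : List (String × String)) :
    (PySem.List.pyRange (a : Int) (PySem.List.len xs) 1).foldl (fun results i =>
        let xi := PySem.List.pyGetD xs i ("", "")
        (PySem.List.pyRange (i + 1) (PySem.List.len xs) 1).foldl (fun results j =>
          if xi.2 == (PySem.List.pyGetD xs j ("", "")).2 then
            results ++ [(xi.1 ++ "_" ++ (PySem.List.pyGetD xs j ("", "")).1, xi.2)]
          else results) results) acc
      = acc ++ pvSpecDup (xs.drop a) := by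
  by_cases hle : xs.length ≤ a
  · rw [PySem.List.pyRange_one_eq_nil (by simp [PySem.List.len]; omega)]
    simp [List.drop_eq_nil_of_le hle, pvSpecDup]
  · push Not at hle
    rw [PySem.List.pyRange_one_cons (by simp [PySem.List.len]; omega)]
    rw [List.foldl_cons]
    have hxi : PySem.List.pyGetD xs (a : Int) ("", "") = xs[a] := by
      rw [PySem.List.pyGetD_natCast]
      exact List.getD_eq_getElem _ _ hle
    simp only [hxi]
    rw [pvA_inner xs xs[a] a acc]
    have hcast : ((a : Int) + 1) = ((a + 1 : Nat) : Int) := by push_cast; ring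
    rw [hcast, pvA_outer xs (a + 1)]
    rw [List.drop_eq_getElem_cons hle]
    simp [pvSpecDup]
termination_by xs.length - a

-- both ports compute pvSpecDup, then apply the same emptiness test
theorem pvA_eq (xs : List (String × String)) :
    duplicates_search_py xs = (if pvSpecDup xs ≠ [] then pvSpecDup xs else xs) := by
  unfold duplicates_search_py
  have h := pvA_outer xs 0 []
  simp only [Nat.cast_zero, List.drop_zero, List.nil_append] at h
  simp only [h]

theorem pvB_eq (xs : List (String × String)) :
    duplicates_search_py_alt xs = (if pvSpecDup xs ≠ [] then pvSpecDup xs else xs) := by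
  unfold duplicates_search_py_alt
  simp only [pvB_chunks xs]

-- ===== VERDICT (by name: the statement is the Claim_ definition above) =====
theorem duplicates_search_py_spec : Claim_equal_duplicates_search_py := by
  intro xs _
  unfold Spec_duplicates_search_py
  rw [pvA_eq, pvB_eq]
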